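-- pv_equiv track=rewrite | github.com/tunamako/google-foobar | Find the Access Codes/solution.py | answer
-- ===== SOURCE A (Python) =====
-- def answer(L):
-- 	divisorCount = [0] * len(L)
-- 	tripleCount = 0
-- 	for i in range(len(L)):
-- 		for j in range(i):
-- 			if L[i] % L[j] == 0:
-- 				divisorCount[i] += 1
-- 				tripleCount += divisorCount[j]
-- 	return tripleCount
-- ===== SOURCE B (Python) =====
-- def answer(L):
--     count = 0
--     for k in range(len(L)):
--         for j in range(k):
--             for i in range(j):
--                 if L[j] % L[i] == 0 and L[k] % L[j] == 0:
--                     count += 1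
--     return count
-- ===== Notes on version B (the rewrite author's own statement) =====
-- stated objective: simpler
-- what changed: Replaced A's dynamic-programming pass that maintains a divisorCount table and accumulates partial chains with a direct brute-force enumeration of all index triples i<j<k, counting each divisibility chain explicitly.
import Mathlib
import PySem

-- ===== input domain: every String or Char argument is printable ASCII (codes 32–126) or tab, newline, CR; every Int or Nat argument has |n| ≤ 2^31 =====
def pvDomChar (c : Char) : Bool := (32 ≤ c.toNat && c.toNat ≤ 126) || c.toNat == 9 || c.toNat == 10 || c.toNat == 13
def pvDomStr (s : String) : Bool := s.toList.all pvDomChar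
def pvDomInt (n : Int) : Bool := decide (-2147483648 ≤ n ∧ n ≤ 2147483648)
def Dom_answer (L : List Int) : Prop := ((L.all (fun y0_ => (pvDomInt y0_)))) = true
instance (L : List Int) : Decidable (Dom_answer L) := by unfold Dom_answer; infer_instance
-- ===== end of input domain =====

-- B replaces A's divisor-count table (the two-loop accumulation) with a plain
-- brute-force scan over all index triples i<j<k; not faster, but table-free and plainer.

-- ===== PORT A =====
-- Loop indices come from range(len(L)), so they are nonnegative and in range;
-- '.set i.toNat' is therefore exact for Python's in-range divisorCount[i] = ….
def answer (L : List Int) : Int :=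
  let res := (PySem.List.pyRange 0 (L.length : Int)).foldl (fun s i =>
    (PySem.List.pyRange 0 i).foldl (fun s j =>
      if PySem.Int.mod (PySem.List.pyGetD L i 0) (PySem.List.pyGetD L j 0) == 0 then
        let dc := s.1.set i.toNat (PySem.List.pyGetD s.1 i 0 + 1)
        (dc, s.2 + PySem.List.pyGetD dc j 0)
      else s) s)
    (List.replicate L.length (0 : Int), (0 : Int))
  res.2

-- ===== PORT B =====
def answer_alt (L : List Int) : Int :=
  (PySem.List.pyRange 0 (L.length : Int)).foldl (fun c k =>
    (PySem.List.pyRange 0 k).foldl (fun c j =>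
      (PySem.List.pyRange 0 j).foldl (fun c i =>
        if (PySem.Int.mod (PySem.List.pyGetD L j 0) (PySem.List.pyGetD L i 0) == 0)
           && (PySem.Int.mod (PySem.List.pyGetD L k 0) (PySem.List.pyGetD L j 0) == 0)
        then c + 1 else c) c) c) (0 : Int)

-- ===== PRECONDITION & SPEC =====
-- Pre_ excludes exactly the inputs on which the Python A raises ZeroDivisionError:
-- a 0 anywhere before the last element is eventually used as a divisor (L[i] % L[j], j < i).
def Pre_answer (L : List Int) : Prop := (0 : Int) ∉ L.dropLast
instance (L : List Int) : Decidable (Pre_answer L) := by unfold Pre_answer; infer_instance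

def pvWitness_answer : List Int := [1, 2, 4, 8]

def Spec_answer (L : List Int) (out : Int) : Prop := out = answer_alt L
instance (L : List Int) (out : Int) : Decidable (Spec_answer L out) := by unfold Spec_answer; infer_instance

-- ===== CLAIM (what is proved, stated in full; the proofs are below) =====
def Claim_equal_answer : Prop := ∀ (L : List Int), Dom_answer L → Pre_answer L → Spec_answer L (answer L)

-- ===== LEMMAS AND PROOFS =====

-- qT L a b: the divisibility test both programs make (L[b] % L[a] == 0, for a < b)
def qT (L : List Int) (a b : Nat) : Bool := PySem.Int.mod (L.getD b 0) (L.getD a 0) == 0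

-- number of divisors of L[b] among earlier entries (A's divisorCount[b])
def dCnt (L : List Int) (b : Nat) : Nat := (List.range b).countP (fun a => qT L a b)

-- common value: for each last index k, sum over middle indices j < k with qT j k of dCnt j
def tcSpec (L : List Int) (m : Nat) : Int :=
  ((List.range m).map (fun k =>
    ((List.range k).map (fun j => if qT L j k then (dCnt L j : Int) else 0)).sum)).sum

-- A's divisorCount list after the outer loop has processed indices < m
def dcSpec (L : List Int) (m : Nat) : List Int :=
  (List.range L.length).map (fun t => if t < m then (dCnt L t : Int) else 0)

theorem dcSpec_getD (L : List Int) (m t : Nat) (ht : t < L.length) :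
    (dcSpec L m).getD t 0 = if t < m then (dCnt L t : Int) else 0 := by
  rw [dcSpec, List.getD, List.getElem?_map, List.getElem?_range ht]
  rfl

theorem dcSpec_set (L : List Int) (m : Nat) (hm : m < L.length) :
    (dcSpec L m).set m ((dcSpec L m).getD m 0 + (dCnt L m : Int)) = dcSpec L (m + 1) := by
  apply List.ext_getElem
  · simp [dcSpec]
  · intro t h1 h2
    simp only [dcSpec, List.length_set, List.length_map, List.length_range] at h1 h2 ⊢
    by_cases htm : t = m
    · subst htm
      rw [List.getElem_set_self]
      rw [show (List.map (fun t_1 => if t_1 < t then ((dCnt L t_1 : Int)) else 0) (List.range L.length)) = dcSpec L t from rfl,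
          dcSpec_getD L t t hm]
      simp
    · rw [List.getElem_set_ne (by omega)]
      simp only [List.getElem_map, List.getElem_range]
      by_cases h3 : t < m
      · rw [if_pos h3, if_pos (by omega)]
      · rw [if_neg h3, if_neg (by omega)]

-- A's inner loop: it bumps slot m of the table and accumulates table reads at j < m
theorem inner_lemma (L : List Int) (m : Nat) :
    ∀ (js : List Nat) (dc : List Int) (tc : Int), (∀ j ∈ js, j < m) → m < dc.length →
    js.foldl (fun s j =>
        if qT L j m then
          (s.1.set m (s.1.getD m 0 + 1), s.2 + (s.1.set m (s.1.getD m 0 + 1)).getD j 0)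
        else s) (dc, tc)
      = (dc.set m (dc.getD m 0 + (js.countP (fun j => qT L j m) : Int)),
         tc + (js.map (fun j => if qT L j m then dc.getD j 0 else 0)).sum) := by
  intro js
  induction js with
  | nil =>
    intro dc tc _ hm
    simp only [List.foldl_nil, List.countP_nil, List.map_nil, List.sum_nil, Nat.cast_zero, add_zero]
    rw [List.getD, List.getElem?_eq_getElem hm]
    simp [List.set_getElem_self]
  | cons j rest ih =>
    intro dc tc hlt hm
    simp only [List.foldl_cons]
    by_cases hq : qT L j m
    · have hjm : j ≠ m := Nat.ne_of_lt (hlt j (by simp))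
      rw [if_pos hq]
      rw [ih _ _ (fun x hx => hlt x (by simp [hx])) (by simpa using hm)]
      have hget_ne : ∀ (v : Int) (x : Nat), x ≠ m → (dc.set m v).getD x 0 = dc.getD x 0 := by
        intro v x hx
        simp [List.getD, List.getElem?_set_ne (Ne.symm hx)]
      have hget_self : ∀ (v : Int), (dc.set m v).getD m 0 = v := by
        intro v
        simp [List.getD, hm]
      simp only [Prod.mk.injEq]
      constructor
      · rw [List.set_set, hget_self]
        congr 1
        rw [List.countP_cons, if_pos hq]
        push_cast
        ring
      · rw [hget_ne _ j hjm]
        have : (rest.map (fun x => if qT L x m then (dc.set m (dc.getD m 0 + 1)).getD x 0 else 0))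
             = (rest.map (fun x => if qT L x m then dc.getD x 0 else 0)) := by
          apply List.map_congr_left
          intro x hx
          by_cases h2 : qT L x m
          · simp only [h2, if_true]
            exact hget_ne _ x (Nat.ne_of_lt (hlt x (by simp [hx])))
          · simp [h2]
        rw [this, List.map_cons, List.sum_cons, if_pos hq]
        ring
    · rw [if_neg hq]
      rw [ih _ _ (fun x hx => hlt x (by simp [hx])) hm]
      simp only [Prod.mk.injEq]
      constructor
      · congr 2
        simp [hq]
      · simp [hq]

-- A's outer loop invariant
theorem A_state (L : List Int) : ∀ m, m ≤ L.length →
    ((List.range m).foldl (fun s i =>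
      (List.range i).foldl (fun s j =>
        if qT L j i then
          (s.1.set i (s.1.getD i 0 + 1), s.2 + (s.1.set i (s.1.getD i 0 + 1)).getD j 0)
        else s) s)
      (List.replicate L.length (0 : Int), (0 : Int))) = (dcSpec L m, tcSpec L m) := by
  intro m
  induction m with
  | zero =>
    intro _
    simp [dcSpec, tcSpec, List.map_const']
  | succ m ih =>
    intro hm1
    have hm : m < L.length := by omega
    rw [List.range_succ, List.foldl_append, ih (by omega), List.foldl_cons, List.foldl_nil]
    rw [inner_lemma L m (List.range m) _ _ (fun j hj => List.mem_range.mp hj) (by simp [dcSpec]; omega)]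
    simp only [Prod.mk.injEq]
    constructor
    · rw [show ((List.range m).countP (fun j => qT L j m) : Int) = (dCnt L m : Int) from rfl]
      exact dcSpec_set L m hm
    · rw [List.map_congr_left (fun j hj => by
        rw [dcSpec_getD L m j (by have := List.mem_range.mp hj; omega),
            if_pos (List.mem_range.mp hj)])]
      conv_rhs => rw [tcSpec, List.range_succ, List.map_append, List.sum_append]
      rw [tcSpec]
      simp

-- Nat-indexed reading of the port of A (pyRange/pyGetD turned into List.range/getD)
theorem answer_eq_nat (L : List Int) :
    answer L = ((List.range L.length).foldl (fun s i =>
      (List.range i).foldl (fun s j =>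
        if qT L j i then
          (s.1.set i (s.1.getD i 0 + 1), s.2 + (s.1.set i (s.1.getD i 0 + 1)).getD j 0)
        else s) s)
      (List.replicate L.length (0 : Int), (0 : Int))).2 := by
  unfold answer
  refine congrArg Prod.snd ?_
  rw [PySem.List.pyRange_zero_natCast, List.foldl_map]
  apply PySem.List.foldl_congr_mem
  intro s i _
  rw [PySem.List.pyRange_zero_natCast, List.foldl_map]
  apply PySem.List.foldl_congr_mem
  intro s' j _
  simp [qT, PySem.List.pyGetD_natCast]

-- Nat-indexed reading of the port of B
theorem alt_eq_nat (L : List Int) :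
    answer_alt L = ((List.range L.length).foldl (fun c k =>
      (List.range k).foldl (fun c j =>
        (List.range j).foldl (fun c i =>
          if qT L i j && qT L j k then c + 1 else c) c) c) (0 : Int)) := by
  unfold answer_alt
  rw [PySem.List.pyRange_zero_natCast, List.foldl_map]
  apply PySem.List.foldl_congr_mem
  intro c k _
  rw [PySem.List.pyRange_zero_natCast, List.foldl_map]
  apply PySem.List.foldl_congr_mem
  intro c' j _
  rw [PySem.List.pyRange_zero_natCast, List.foldl_map]
  apply PySem.List.foldl_congr_mem
  intro c'' i _
  simp [qT, PySem.List.pyGetD_natCast]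

-- B's triple loop counts, grouped by its outer two indices, the same sums
theorem alt_eq_spec_nat (L : List Int) :
    ((List.range L.length).foldl (fun c k =>
      (List.range k).foldl (fun c j =>
        (List.range j).foldl (fun c i =>
          if qT L i j && qT L j k then c + 1 else c) c) c) (0 : Int)) = tcSpec L L.length := by
  have hinner : ∀ (k : Nat) (c : Int) (j : Nat),
      (List.range j).foldl (fun c i => if qT L i j && qT L j k then c + 1 else c) c
      = c + (if qT L j k then (dCnt L j : Int) else 0) := by
    intro k c j
    rw [PySem.List.foldl_if_add_one (p := fun i => qT L i j && qT L j k)]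
    by_cases hq : qT L j k
    · simp only [hq, Bool.and_true, if_pos]
      rfl
    · simp [hq]
  have hmid : ∀ (c : Int) (k : Nat),
      (List.range k).foldl (fun c j =>
        (List.range j).foldl (fun c i =>
          if qT L i j && qT L j k then c + 1 else c) c) c
      = c + ((List.range k).map (fun j => if qT L j k then (dCnt L j : Int) else 0)).sum := by
    intro c k
    rw [PySem.List.foldl_congr_mem (List.range k)
        (fun c j => (List.range j).foldl (fun c i => if qT L i j && qT L j k then c + 1 else c) c)
        (fun c j => c + (if qT L j k then (dCnt L j : Int) else 0)) c
        (fun c j _ => hinner k c j),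
      PySem.List.foldl_add]
  rw [PySem.List.foldl_congr_mem (List.range L.length)
      (fun c k => (List.range k).foldl (fun c j =>
        (List.range j).foldl (fun c i =>
          if qT L i j && qT L j k then c + 1 else c) c) c)
      (fun c k => c + ((List.range k).map (fun j => if qT L j k then (dCnt L j : Int) else 0)).sum) 0
      (fun c k _ => hmid c k),
    PySem.List.foldl_add]
  simp [tcSpec]

-- ===== VERDICT (by name: the statement is the Claim_ definition above) =====
theorem answer_spec : Claim_equal_answer := by
  intro L _ _
  unfold Spec_answer
  rw [answer_eq_nat, A_state L L.length le_rfl, alt_eq_nat, alt_eq_spec_nat]
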